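-- pv_equiv track=rewrite | github.com/bluedazzle/django-vue.js-blog | core/pyutil/conf2.py | parse_qs_keys
-- ===== SOURCE A (Python) =====
-- import string
--
-- def parse_qs_keys(qs):
--     start = 0
--     keys = []
--     qs, _, _ = qs.partition("#")
--
--     # There's no query string.
--     if not qs:
--         return keys
--
--     # Is a punctuation.
--     is_punc = qs[0] in string.punctuation
--
--     for i in range(1, len(qs)):
--         is_mut = is_punc ^ (qs[i] in string.punctuation)
--         is_punc = qs[i] in string.punctuation
--
--         # There isn't a mutation.
--         if not is_mut:
--             continue
--
--         keys.append(qs[start:i])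
--         start = i
--
--     keys.append(qs[start:])
--     return keys
-- ===== SOURCE B (Python) =====
-- import re
-- import string
--
-- # Regex-based: one alternation pattern "[punct]+|[^punct]+" makes the regex engine
-- # extract maximal punctuation / non-punctuation runs; no explicit per-character loop or state.
-- _RUNS = re.compile('[%s]+|[^%s]+' % (re.escape(string.punctuation), re.escape(string.punctuation)))
--
-- def parse_qs_keys(qs):
--     qs = qs.partition("#")[0]
--     if not qs:
--         return []
--     return _RUNS.findall(qs)
-- ===== Notes on version B (the rewrite author's own statement) =====
-- stated objective: faster
-- what changed: Replaces A's hand-written scanner (index loop with start/is_punc/is_mut state and slicing at each class change) by a single regex findall on an alternation of a punctuation-run class and its complement, which extracts the maximal runs with no explicit per-character Python loop.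
import Mathlib
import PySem

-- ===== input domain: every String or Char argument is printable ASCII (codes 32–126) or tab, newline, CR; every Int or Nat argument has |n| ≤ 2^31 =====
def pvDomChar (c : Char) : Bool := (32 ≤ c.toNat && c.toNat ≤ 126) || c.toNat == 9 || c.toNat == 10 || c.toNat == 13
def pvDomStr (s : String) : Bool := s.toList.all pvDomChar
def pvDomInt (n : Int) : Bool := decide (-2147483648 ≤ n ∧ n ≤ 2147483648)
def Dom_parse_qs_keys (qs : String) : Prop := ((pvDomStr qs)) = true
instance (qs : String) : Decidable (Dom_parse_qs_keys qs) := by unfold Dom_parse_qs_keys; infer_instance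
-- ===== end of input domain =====

-- B replaces A's index loop with start/is_punc/is_mut state tracking by one regex findall
-- on an alternation of the punctuation class and its complement (measured faster in CPython).

-- string.punctuation, used by both programs
def puncChars : List Char := "!\"#$%&'()*+,-./:;<=>?@[\\]^_`{|}~".toList

-- `c in string.punctuation` for a single character c (exact: one-char substring test = membership)
def isPunc (c : Char) : Bool := puncChars.contains c

-- ===== PORT A =====
-- the body of A's `for i in range(1, len(qs))` loop; state = (start, keys, is_punc)
def parseBodyA (s : List Char) (st : Int × List String × Bool) (i : Int) :
    Int × List String × Bool :=
  let cp := isPunc (PySem.List.pyGetD s i ' ')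
  let is_mut := st.2.2 != cp
  if is_mut then
    (i, st.2.1 ++ [String.mk (PySem.List.slice s (some st.1) (some i))], cp)
  else
    (st.1, st.2.1, cp)

def parse_qs_keys (qs : String) : List String :=
  -- qs, _, _ = qs.partition("#"): the part before the first '#' (exact for a 1-char separator)
  let s := qs.toList.takeWhile (· ≠ '#')
  if s = [] then []
  else
    let st := (PySem.List.pyRange 1 (PySem.List.len s) 1).foldl (parseBodyA s)
      (0, ([] : List String), isPunc (PySem.List.pyGetD s 0 ' '))
    st.2.1 ++ [String.mk (PySem.List.slice s (some st.1) none)]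

-- ===== PORT B =====
-- re.findall on the fixed pattern '[P]+|[^P]+' (P = punctuation). PySem has no regex, so it
-- is ported by hand, exactly as the regex engine proceeds for this pattern: at each
-- position the engine matches the longest run of characters in the current character's
-- class and scanning resumes right after the match. `takeRun b` is the greedy match of
-- `[P]+`/`[^P]+` (the class with truth value b): (matched run, remainder).
def takeRun (b : Bool) : List Char → List Char × List Char
  | [] => ([], [])
  | c :: t =>
    if isPunc c = b then ((c :: (takeRun b t).1), (takeRun b t).2)
    else ([], c :: t)

theorem takeRun_snd_length (b : Bool) (t : List Char) :
    (takeRun b t).2.length ≤ t.length := by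
  induction t with
  | nil => simp [takeRun]
  | cons c t ih =>
    simp only [takeRun]
    split_ifs
    · exact le_trans ih (Nat.le_succ _)
    · simp

-- findall: successive non-overlapping matches of the pattern, left to right
def reFindall : List Char → List String
  | [] => []
  | c :: t => String.mk (c :: (takeRun (isPunc c) t).1) :: reFindall (takeRun (isPunc c) t).2
termination_by s => s.length
decreasing_by
  exact Nat.lt_succ_of_le (takeRun_snd_length _ t)

def parse_qs_keys_alt (qs : String) : List String :=
  let s := qs.toList.takeWhile (· ≠ '#')
  if s = [] then []
  else reFindall s

-- ===== PRECONDITION & SPEC =====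
def Spec_parse_qs_keys (qs : String) (out : List String) : Prop := out = parse_qs_keys_alt qs
instance (qs : String) (out : List String) : Decidable (Spec_parse_qs_keys qs out) := by unfold Spec_parse_qs_keys; infer_instance

-- ===== CLAIM (what is proved, stated in full; the proofs are below) =====
def Claim_equal_parse_qs_keys : Prop := ∀ (qs : String), Dom_parse_qs_keys qs → Spec_parse_qs_keys qs (parse_qs_keys qs)

-- ===== LEMMAS AND PROOFS =====

-- proof helper: the maximal runs of characters with equal punctuation class, computed
-- back-to-front; both ports are related to this characterisation
def chunks : List Char → List (List Char)
  | [] => []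
  | c :: t =>
    match chunks t with
    | [] => [[c]]
    | r :: rs => if isPunc c = isPunc (r.headD ' ') then (c :: r) :: rs else [c] :: r :: rs

theorem mem_chunks_ne_nil (s : List Char) (r : List Char) (h : r ∈ chunks s) : r ≠ [] := by
  induction s generalizing r with
  | nil => simp [chunks] at h
  | cons c t ih =>
    simp only [chunks] at h
    rcases hc : chunks t with _ | ⟨q, qs⟩ <;> rw [hc] at h <;> dsimp only at h
    · simp at h; simp [h]
    · split_ifs at h
      · rcases List.mem_cons.mp h with h | h
        · subst h; simp
        · exact ih _ (hc ▸ List.mem_cons_of_mem q h)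
      · rcases List.mem_cons.mp h with h | h
        · subst h; simp
        · exact ih _ (hc ▸ h)

theorem chunks_eq_nil_iff (s : List Char) : chunks s = [] ↔ s = [] := by
  cases s with
  | nil => simp [chunks]
  | cons c t =>
    simp only [chunks]
    rcases chunks t with _ | ⟨q, qs⟩ <;> dsimp only <;> [simp; split_ifs] <;> simp

theorem flatten_chunks (s : List Char) : (chunks s).flatten = s := by
  induction s with
  | nil => rfl
  | cons c t ih =>
    simp only [chunks]
    rcases hc : chunks t with _ | ⟨q, qs⟩ <;> rw [hc] at ih <;> dsimp only
    · simp at ih; simp [ih]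
    · split_ifs <;> simp_all

theorem chunks_headD (s : List Char) (h : s ≠ []) :
    ((chunks s).headD []).headD ' ' = s.headD ' ' := by
  cases s with
  | nil => simp at h
  | cons c t =>
    simp only [chunks]
    rcases chunks t with _ | ⟨q, qs⟩ <;> dsimp only <;> [simp; split_ifs] <;> simp

theorem chunks_append (s : List Char) (x : Char) (hs : s ≠ []) :
    chunks (s ++ [x]) =
      if isPunc x = isPunc (s.getLastD ' ')
      then (chunks s).dropLast ++ [(chunks s).getLastD [] ++ [x]]
      else chunks s ++ [[x]] := by
  induction s with
  | nil => simp at hs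
  | cons c t ih =>
    cases t with
    | nil =>
      by_cases h : isPunc x = isPunc c <;>
        simp [chunks, h, eq_comm]
    | cons d t' =>
      have ht : d :: t' ≠ [] := by simp
      rcases hc : chunks (d :: t') with _ | ⟨q, qs⟩
      · exact absurd ((chunks_eq_nil_iff _).mp hc) ht
      obtain ⟨e, q', rfl⟩ := List.exists_cons_of_ne_nil
        (mem_chunks_ne_nil _ _ (hc ▸ List.mem_cons_self))
      have hhead : e = d := by
        have := chunks_headD (d :: t') ht
        rw [hc] at this; simpa using this
      subst hhead
      have hL : chunks ((c :: e :: t') ++ [x]) = match chunks ((e :: t') ++ [x]) with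
        | [] => [[c]]
        | r :: rs => if isPunc c = isPunc (r.headD ' ') then (c :: r) :: rs else [c] :: r :: rs := rfl
      have hR : chunks (c :: e :: t') = match chunks (e :: t') with
        | [] => [[c]]
        | r :: rs => if isPunc c = isPunc (r.headD ' ') then (c :: r) :: rs else [c] :: r :: rs := rfl
      rw [hL, ih ht, hR, hc]
      by_cases hb : isPunc x = isPunc ((e :: t').getLastD ' ') <;>
        [rw [if_pos hb]; rw [if_neg hb]] <;>
        cases qs <;>
        by_cases hpc : isPunc c = isPunc e <;>
        simp only [List.getLastD_eq_getLast?] at hb <;>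
        simp [hpc, hb]

theorem chunks_decomp (s : List Char) (hs : s ≠ []) :
    chunks s = (chunks s).dropLast ++ [(chunks s).getLastD []] := by
  have h : chunks s ≠ [] := fun h => hs ((chunks_eq_nil_iff s).mp h)
  conv_lhs => rw [← List.dropLast_append_getLast h]
  congr 1
  simp [List.getLastD_eq_getLast?, List.getLast?_eq_some_getLast h]

def lastLen (s : List Char) : Nat := ((chunks s).getLastD []).length

theorem lastLen_le (s : List Char) : lastLen s ≤ s.length := by
  rcases eq_or_ne s [] with rfl | hs
  · simp [lastLen, chunks]
  · conv_rhs => rw [← flatten_chunks s, chunks_decomp s hs]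
    simp [lastLen]

theorem take_decomp (s : List Char) (j : Nat) (h1 : 1 ≤ j) (h2 : j ≤ s.length) :
    ((s.drop (j - lastLen (s.take j))).take (lastLen (s.take j)))
      = (chunks (s.take j)).getLastD [] := by
  have hlen : (s.take j).length = j := by simp; omega
  have htjne : s.take j ≠ [] := by
    intro h; rw [h] at hlen; simp at hlen; omega
  have hflat : (chunks (s.take j)).dropLast.flatten ++ (chunks (s.take j)).getLastD []
      = s.take j := by
    conv_rhs => rw [← flatten_chunks (s.take j), chunks_decomp (s.take j) htjne]
    simp
  have hfl : (chunks (s.take j)).dropLast.flatten.length = j - lastLen (s.take j) := by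
    have h2' : ((chunks (s.take j)).dropLast.flatten ++ (chunks (s.take j)).getLastD []).length = j := by
      rw [hflat]; exact hlen
    simp only [List.length_append] at h2'
    unfold lastLen; omega
  set L := lastLen (s.take j) with hL
  set C := (chunks (s.take j)).getLastD [] with hC
  set I := (chunks (s.take j)).dropLast.flatten with hI
  have hCL : C.length = L := rfl
  have hs' : s = I ++ (C ++ s.drop j) := by
    conv_lhs => rw [← List.take_append_drop j s, ← hflat]
    simp
  conv_lhs => rw [hs']
  rw [← hfl, List.drop_left]
  exact List.take_left' hCL

def Astate (s : List Char) (j : Nat) : Int × List String × Bool :=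
  ((j : Int) - (lastLen (s.take j) : Int),
   ((chunks (s.take j)).dropLast).map String.mk,
   isPunc ((s.take j).getLastD ' '))

theorem step_lemma (s : List Char) (j : Nat) (h1 : 1 ≤ j) (h2 : j < s.length) :
    parseBodyA s (Astate s j) (j : Int) = Astate s (j + 1) := by
  have hget : PySem.List.pyGetD s (j : Int) ' ' = s[j] := by
    simp [List.getElem?_eq_getElem h2]
  have htake : s.take (j + 1) = s.take j ++ [s[j]] := by
    rw [List.take_add_one]; simp [List.getElem?_eq_getElem h2]
  have hlen : (s.take j).length = j := by simp; omega
  have htjne : s.take j ≠ [] := by intro h; rw [h] at hlen; simp at hlen; omega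
  have hLle : lastLen (s.take j) ≤ j := by
    have := lastLen_le (s.take j); omega
  have happ := chunks_append (s.take j) (s[j]) htjne
  by_cases hk : isPunc s[j] = isPunc ((s.take j).getLastD ' ')
  · rw [if_pos hk] at happ
    have hmut : (isPunc ((s.take j).getLastD ' ') != isPunc s[j]) = false := by
      rw [hk]; exact bne_self_eq_false _
    have hll : lastLen (s.take (j + 1)) = lastLen (s.take j) + 1 := by
      unfold lastLen; rw [htake, happ, List.getLastD_concat]; simp
    unfold parseBodyA Astate
    rw [hget]
    simp only [hmut, Bool.false_eq_true, if_false]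
    refine Prod.ext ?_ (Prod.ext ?_ ?_)
    · simp only [hll]; push_cast; ring
    · rw [htake, happ, List.dropLast_concat]
    · rw [htake, List.getLastD_concat, hk]
  · rw [if_neg hk] at happ
    have hmut : (isPunc ((s.take j).getLastD ' ') != isPunc s[j]) = true := by
      rw [bne_iff_ne]; exact fun h => hk h.symm
    have hll : lastLen (s.take (j + 1)) = 1 := by
      unfold lastLen; rw [htake, happ, List.getLastD_concat]; rfl
    unfold parseBodyA Astate
    rw [hget]
    simp only [hmut, if_true]
    refine Prod.ext ?_ (Prod.ext ?_ ?_)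
    · simp only [hll]; push_cast; ring
    · have hcast : (j : Int) - (lastLen (s.take j) : Int)
          = ((j - lastLen (s.take j) : Nat) : Int) := by push_cast [hLle]; ring
      rw [hcast, PySem.List.slice_natCast, Nat.sub_sub_self hLle,
        take_decomp s j h1 (le_of_lt h2), htake, happ, List.dropLast_concat]
      conv_rhs => rw [chunks_decomp (s.take j) htjne]
      simp
    · rw [htake, List.getLastD_concat]

theorem loop_lemma (s : List Char) (j : Nat) (h1 : 1 ≤ j) (h2 : j ≤ s.length) :
    (PySem.List.pyRange (j : Int) (s.length : Int) 1).foldl (parseBodyA s) (Astate s j)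
      = Astate s s.length := by
  obtain ⟨k, hk⟩ : ∃ k, s.length - j = k := ⟨_, rfl⟩
  induction k generalizing j with
  | zero =>
    have hj : j = s.length := by omega
    subst hj
    rw [PySem.List.pyRange_one_eq_nil (le_refl _)]
    rfl
  | succ k ih =>
    have hlt : j < s.length := by omega
    rw [PySem.List.pyRange_one_cons (by exact_mod_cast hlt), List.foldl_cons,
      step_lemma s j h1 hlt]
    have hc : ((j : Int) + 1) = ((j + 1 : Nat) : Int) := by push_cast; ring
    rw [hc]
    exact ih (j + 1) (by omega) hlt (by omega)

theorem init_state (s : List Char) (hs : s ≠ []) :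
    ((0 : Int), ([] : List String), isPunc (PySem.List.pyGetD s 0 ' ')) = Astate s 1 := by
  obtain ⟨c, t, rfl⟩ := List.exists_cons_of_ne_nil hs
  unfold Astate lastLen
  simp [chunks, PySem.List.pyGetD_zero_cons]

theorem final_state (s : List Char) (hs : s ≠ []) :
    (Astate s s.length).2.1
        ++ [String.mk (PySem.List.slice s (some (Astate s s.length).1) none)]
      = (chunks s).map String.mk := by
  have hL : lastLen s ≤ s.length := lastLen_le s
  have hdrop : s.drop (s.length - lastLen s) = (chunks s).getLastD [] := by
    have h1 : (s.drop (s.length - lastLen s)).length = lastLen s := by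
      simp; omega
    have := take_decomp s s.length (by
      rcases s with _ | _
      · simp at hs
      · simp) (le_refl _)
    rw [List.take_length] at this
    rw [List.take_of_length_le (le_of_eq h1)] at this
    exact this
  unfold Astate
  rw [List.take_length]
  have hcast : (s.length : Int) - (lastLen s : Int)
      = ((s.length - lastLen s : Nat) : Int) := by push_cast [hL]; ring
  rw [hcast, PySem.List.slice_from_natCast, hdrop]
  conv_rhs => rw [chunks_decomp s hs]
  simp

theorem main_lemma (s : List Char) (hs : s ≠ []) :
    ((PySem.List.pyRange 1 (PySem.List.len s) 1).foldl (parseBodyA s)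
        (0, ([] : List String), isPunc (PySem.List.pyGetD s 0 ' '))).2.1
      ++ [String.mk (PySem.List.slice s
            (some ((PySem.List.pyRange 1 (PySem.List.len s) 1).foldl (parseBodyA s)
        (0, ([] : List String), isPunc (PySem.List.pyGetD s 0 ' '))).1) none)]
      = (chunks s).map String.mk := by
  have hn : 1 ≤ s.length := by
    rcases s with _ | _
    · simp at hs
    · simp
  have hfold : (PySem.List.pyRange 1 (PySem.List.len s) 1).foldl (parseBodyA s)
      (0, ([] : List String), isPunc (PySem.List.pyGetD s 0 ' ')) = Astate s s.length := by
    rw [init_state s hs]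
    have h1 : PySem.List.len s = (s.length : Int) := by simp
    rw [h1]
    have := loop_lemma s 1 (le_refl _) hn
    exact_mod_cast this
  rw [hfold]
  exact final_state s hs

-- chunks splits as B's greedy leading-run extraction
theorem chunks_cons_takeRun (t : List Char) (c : Char) :
    chunks (c :: t)
      = (c :: (takeRun (isPunc c) t).1) :: chunks (takeRun (isPunc c) t).2 := by
  induction t generalizing c with
  | nil => simp [chunks, takeRun]
  | cons d t' ih =>
    by_cases h : isPunc d = isPunc c
    · have hcd : chunks (c :: d :: t') = match chunks (d :: t') with
        | [] => [[c]]
        | r :: rs => if isPunc c = isPunc (r.headD ' ') then (c :: r) :: rs else [c] :: r :: rs := rfl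
      rw [hcd, ih d]
      simp [takeRun, h]
    · have hcd : chunks (c :: d :: t') = match chunks (d :: t') with
        | [] => [[c]]
        | r :: rs => if isPunc c = isPunc (r.headD ' ') then (c :: r) :: rs else [c] :: r :: rs := rfl
      have h' : ¬ isPunc c = isPunc d := fun hh => h hh.symm
      rw [hcd, ih d]
      simp [takeRun, h, h', ← ih d]

theorem reFindall_eq_chunks (s : List Char) : reFindall s = (chunks s).map String.mk := by
  induction s using reFindall.induct with
  | case1 => rw [reFindall]; rfl
  | case2 c t ih =>
    rw [reFindall, chunks_cons_takeRun, List.map_cons, ih]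

-- ===== VERDICT (by name: the statement is the Claim_ definition above) =====
theorem parse_qs_keys_spec : Claim_equal_parse_qs_keys := by
  intro qs _
  unfold Spec_parse_qs_keys parse_qs_keys parse_qs_keys_alt
  dsimp only
  split_ifs with h
  · rfl
  · rw [reFindall_eq_chunks]
    exact main_lemma _ h
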